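-- pv_equiv track=rewrite | github.com/mudstrand/daily_devotional | parse_messages/archive/code/auto_corpus_profile.py | extract_header_fields
-- ===== SOURCE A (Python) =====
-- from typing import List, Dict, Tuple, Optional
--
-- HDR_BODY_SEP = '=' * 67
--
-- def extract_header_fields(full_text: str) -> Dict[str, str]:
--     hdr = {'message_id': '', 'subject': '', 'from': '', 'to': '', 'date': ''}
--     for line in full_text.splitlines():
--         if line.startswith('message_id: '):
--             hdr['message_id'] = line.split('message_id: ', 1)[1].strip()
--         elif line.startswith('subject   : '):
--             hdr['subject'] = line.split('subject   : ', 1)[1].strip()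
--         elif line.startswith('from      : '):
--             hdr['from'] = line.split('from      : ', 1)[1].strip()
--         elif line.startswith('to        : '):
--             hdr['to'] = line.split('to        : ', 1)[1].strip()
--         elif line.startswith('date      : '):
--             hdr['date'] = line.split('date      : ', 1)[1].strip()
--         if line.strip() == HDR_BODY_SEP:
--             break
--     return hdr
-- ===== SOURCE B (Python) =====
-- HDR_BODY_SEP = '=' * 67
--
-- PREFIXES = [
--     ('message_id', 'message_id: '),
--     ('subject', 'subject   : '),
--     ('from', 'from      : '),
--     ('to', 'to        : '),
--     ('date', 'date      : '),
-- ]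
--
--
-- def _last_value(prefix, head):
--     for line in reversed(head):
--         if line.startswith(prefix):
--             return line[len(prefix):].strip()
--     return ''
--
--
-- def extract_header_fields(full_text):
--     head = []
--     for line in full_text.splitlines():
--         head.append(line)
--         if line.strip() == HDR_BODY_SEP:
--             break
--     return {key: _last_value(prefix, head) for key, prefix in PREFIXES}
-- ===== Notes on version B (the rewrite author's own statement) =====
-- stated objective: alternative
-- what changed: Instead of A's per-line if/elif chain that mutates the dict as it scans, B first cuts the line list at the separator, then builds the result field-by-field from a prefix table, taking for each field the last matching line via one reverse scan.
import Mathlib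
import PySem

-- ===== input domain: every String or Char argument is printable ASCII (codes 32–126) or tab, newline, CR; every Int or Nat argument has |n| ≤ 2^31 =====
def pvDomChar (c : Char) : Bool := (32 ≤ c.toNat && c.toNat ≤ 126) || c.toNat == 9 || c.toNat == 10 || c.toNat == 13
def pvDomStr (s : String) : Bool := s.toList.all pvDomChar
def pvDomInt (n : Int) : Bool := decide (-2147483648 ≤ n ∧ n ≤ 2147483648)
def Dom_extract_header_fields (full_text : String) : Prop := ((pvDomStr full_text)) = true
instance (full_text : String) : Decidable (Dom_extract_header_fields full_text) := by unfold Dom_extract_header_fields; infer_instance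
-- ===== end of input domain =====

-- B replaces A's per-line if/elif chain mutating a dict by: cut the lines at the
-- separator, then build each field independently as the last matching line found
-- by one reverse scan over a prefix table (objective: alternative, same cost).

-- shared module constant HDR_BODY_SEP = '=' * 67
def pvSep : String := "==================================================================="

-- ===== PORT A =====
def pvStepA (l : String) (hdr : PySem.Dict String String) : PySem.Dict String String :=
  if PySem.Str.startswith l "message_id: " then
    hdr.insert "message_id" (PySem.Str.strip ((PySem.List.pyGet? ((PySem.Str.splitMax? l "message_id: " 1).getD []) 1).getD ""))
  else if PySem.Str.startswith l "subject   : " then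
    hdr.insert "subject" (PySem.Str.strip ((PySem.List.pyGet? ((PySem.Str.splitMax? l "subject   : " 1).getD []) 1).getD ""))
  else if PySem.Str.startswith l "from      : " then
    hdr.insert "from" (PySem.Str.strip ((PySem.List.pyGet? ((PySem.Str.splitMax? l "from      : " 1).getD []) 1).getD ""))
  else if PySem.Str.startswith l "to        : " then
    hdr.insert "to" (PySem.Str.strip ((PySem.List.pyGet? ((PySem.Str.splitMax? l "to        : " 1).getD []) 1).getD ""))
  else if PySem.Str.startswith l "date      : " then
    hdr.insert "date" (PySem.Str.strip ((PySem.List.pyGet? ((PySem.Str.splitMax? l "date      : " 1).getD []) 1).getD ""))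
  else hdr

def pvLoopA : List String → PySem.Dict String String → PySem.Dict String String
  | [], hdr => hdr
  | l :: rest, hdr =>
    let hdr' := pvStepA l hdr
    if PySem.Str.strip l = pvSep then hdr' else pvLoopA rest hdr'

def extract_header_fields (full_text : String) : List (String × String) :=
  (pvLoopA (PySem.Str.splitlines full_text)
    (PySem.Dict.ofList [("message_id", ""), ("subject", ""), ("from", ""), ("to", ""), ("date", "")])).items

-- ===== PORT B =====
def pvPrefixes : List (String × String) :=
  [("message_id", "message_id: "), ("subject", "subject   : "),
   ("from", "from      : "), ("to", "to        : "), ("date", "date      : ")]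

-- head of the message: lines up to and including the first separator line
def pvHead : List String → List String
  | [] => []
  | l :: rest => if PySem.Str.strip l = pvSep then [l] else l :: pvHead rest

-- _last_value's loop over reversed(head): first match of the reversed list
def pvLastValue (pre : String) : List String → String
  | [] => ""
  | l :: rest =>
    if PySem.Str.startswith l pre then
      PySem.Str.strip (PySem.Str.slice l (some (PySem.Str.len pre)) none)
    else pvLastValue pre rest

def extract_header_fields_alt (full_text : String) : List (String × String) :=
  let head := pvHead (PySem.Str.splitlines full_text)
  pvPrefixes.map (fun kp => (kp.1, pvLastValue kp.2 head.reverse))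

-- ===== PRECONDITION & SPEC =====
def Spec_extract_header_fields (full_text : String) (out : List (String × String)) : Prop := out = extract_header_fields_alt full_text
instance (full_text : String) (out : List (String × String)) : Decidable (Spec_extract_header_fields full_text out) := by unfold Spec_extract_header_fields; infer_instance

-- ===== CLAIM (what is proved, stated in full; the proofs are below) =====
def Claim_equal_extract_header_fields : Prop := ∀ (full_text : String), Dom_extract_header_fields full_text → Spec_extract_header_fields full_text (extract_header_fields full_text)

-- ===== LEMMAS AND PROOFS =====

-- pvLastValue with an explicit default, to state the loop invariant
def pvLVD (pre dflt : String) : List String → String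
  | [] => dflt
  | l :: rest =>
    if PySem.Str.startswith l pre then
      PySem.Str.strip (PySem.Str.slice l (some (PySem.Str.len pre)) none)
    else pvLVD pre dflt rest

theorem pvLastValue_eq_LVD (pre : String) (xs : List String) :
    pvLastValue pre xs = pvLVD pre "" xs := by
  induction xs with
  | nil => rfl
  | cons l rest ih => simp [pvLastValue, pvLVD, ih]

theorem pvLVD_append (pre d : String) (xs ys : List String) :
    pvLVD pre d (xs ++ ys) = pvLVD pre (pvLVD pre d ys) xs := by
  induction xs with
  | nil => rfl
  | cons l rest ih => simp [pvLVD, ih]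

theorem go_match (pre l cur : List Char) (acc : List (List Char)) (fuel m : Nat)
    (hl : l ≠ []) (hm : m ≠ 0) (hp : pre.isPrefixOf l = true) :
    PySem.Chars.splitOnMax.go pre (fuel + 1) m l cur acc =
      PySem.Chars.splitOnMax.go pre fuel (m - 1) (l.drop pre.length) [] (cur.reverse :: acc) := by
  cases l with
  | nil => exact absurd rfl hl
  | cons c rest => simp [PySem.Chars.splitOnMax.go, hp, hm]

theorem go_zero (pre l cur : List Char) (acc : List (List Char)) (fuel : Nat) :
    PySem.Chars.splitOnMax.go pre (fuel + 1) 0 l cur acc = ((cur.reverse ++ l) :: acc).reverse := by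
  cases l with
  | nil => simp [PySem.Chars.splitOnMax.go]
  | cons c rest => simp [PySem.Chars.splitOnMax.go]

theorem splitOnMax_prefix (pre rest : List Char) (hpre : pre ≠ []) :
    PySem.Chars.splitOnMax (pre ++ rest) pre 1 = [[], rest] := by
  unfold PySem.Chars.splitOnMax
  have hlen : (pre ++ rest).length + 1 = (pre.length + rest.length) + 1 := by simp
  have hl : (pre ++ rest) ≠ [] := by
    cases pre with | nil => exact absurd rfl hpre | cons a b => simp
  have hp : pre.isPrefixOf (pre ++ rest) = true := by
    rw [List.isPrefixOf_iff_prefix]; exact List.prefix_append pre rest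
  have h1 : (0:Int) ≤ 1 := by norm_num
  simp only [show ¬((1:Int) < 0) by norm_num, if_false]
  rw [hlen, go_match pre _ _ _ _ _ hl (by norm_num) hp]
  rw [List.drop_left]
  have : pre.length + rest.length = (pre.length - 1 + rest.length) + 1 := by
    cases pre with | nil => exact absurd rfl hpre | cons a b => simp; omega
  rw [this]
  simp only [show Int.toNat 1 - 1 = 0 from rfl]
  rw [go_zero]
  simp

theorem split1_startswith (l pre : String) (hpre : pre.toList ≠ [])
    (h : PySem.Str.startswith l pre = true) :
    (PySem.List.pyGet? ((PySem.Str.splitMax? l pre 1).getD []) 1).getD "" =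
      PySem.Str.slice l (some (PySem.Str.len pre)) none := by
  have hpref : pre.toList <+: l.toList := by
    rw [← PySem.Chars.startswith_iff]
    simpa using h
  obtain ⟨rest, hrest⟩ := hpref
  have hsplit : PySem.Chars.splitMax? l.toList pre.toList 1 = some [[], rest] := by
    unfold PySem.Chars.splitMax?
    have : pre.toList.isEmpty = false := by
      cases hpl : pre.toList with
      | nil => exact absurd hpl hpre
      | cons a b => simp
    rw [this]
    simp only [Bool.false_eq_true, if_false]
    rw [← hrest, splitOnMax_prefix _ _ hpre]
  have hlen : PySem.Str.len pre = (pre.toList.length : Int) := by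
    simp [PySem.Str.len]
  rw [PySem.Str.splitMax?, hsplit, hlen]
  have hslice : PySem.Str.slice l (some (pre.toList.length : Int)) none =
      String.ofList rest := by
    unfold PySem.Str.slice
    rw [PySem.Chars.slice_eq_listSlice, PySem.List.slice_from_natCast, ← hrest, List.drop_left]
  rw [hslice]
  simp [PySem.List.pyGet?, PySem.List.pyIdx?]

-- two distinct 12-char prefixes cannot both start the same line
theorem not_both (l p q : String) (hlen : p.toList.length = q.toList.length)
    (hne : p.toList ≠ q.toList) (hp : PySem.Str.startswith l p = true) :
    PySem.Str.startswith l q = false := by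
  by_contra hq
  have hq' : PySem.Str.startswith l q = true := by
    cases h : PySem.Str.startswith l q with
    | false => exact absurd h hq
    | true => rfl
  have h1 : p.toList <+: l.toList := by rw [← PySem.Chars.startswith_iff]; simpa using hp
  have h2 : q.toList <+: l.toList := by rw [← PySem.Chars.startswith_iff]; simpa using hq'
  have h3 : p.toList <+: q.toList := List.prefix_of_prefix_length_le h1 h2 (le_of_eq hlen)
  exact hne (h3.eq_of_length hlen)

-- one line of A's loop body updates the dict exactly as pvLVD _ v [l] updates each field
theorem stepA_eq (l v1 v2 v3 v4 v5 : String) :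
    pvStepA l (PySem.Dict.mk [("message_id", v1), ("subject", v2), ("from", v3), ("to", v4), ("date", v5)]) =
    PySem.Dict.mk [("message_id", pvLVD "message_id: " v1 [l]),
                   ("subject", pvLVD "subject   : " v2 [l]),
                   ("from", pvLVD "from      : " v3 [l]),
                   ("to", pvLVD "to        : " v4 [l]),
                   ("date", pvLVD "date      : " v5 [l])] := by
  by_cases h1 : PySem.Str.startswith l "message_id: " = true
  · have n2 := not_both l "message_id: " "subject   : " (by decide) (by decide) h1
    have n3 := not_both l "message_id: " "from      : " (by decide) (by decide) h1
    have n4 := not_both l "message_id: " "to        : " (by decide) (by decide) h1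
    have n5 := not_both l "message_id: " "date      : " (by decide) (by decide) h1
    simp only [pvStepA, pvLVD, split1_startswith l "message_id: " (by decide) h1]
    simp at h1 n2 n3 n4 n5
    simp [h1, n2, n3, n4, n5, PySem.Dict.insert]
  · by_cases h2 : PySem.Str.startswith l "subject   : " = true
    · have n3 := not_both l "subject   : " "from      : " (by decide) (by decide) h2
      have n4 := not_both l "subject   : " "to        : " (by decide) (by decide) h2
      have n5 := not_both l "subject   : " "date      : " (by decide) (by decide) h2
      simp only [pvStepA, pvLVD, split1_startswith l "subject   : " (by decide) h2]
      simp at h1 h2 n3 n4 n5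
      simp [h1, h2, n3, n4, n5, PySem.Dict.insert]
    · by_cases h3 : PySem.Str.startswith l "from      : " = true
      · have n4 := not_both l "from      : " "to        : " (by decide) (by decide) h3
        have n5 := not_both l "from      : " "date      : " (by decide) (by decide) h3
        simp only [pvStepA, pvLVD, split1_startswith l "from      : " (by decide) h3]
        simp at h1 h2 h3 n4 n5
        simp [h1, h2, h3, n4, n5, PySem.Dict.insert]
      · by_cases h4 : PySem.Str.startswith l "to        : " = true
        · have n5 := not_both l "to        : " "date      : " (by decide) (by decide) h4
          simp only [pvStepA, pvLVD, split1_startswith l "to        : " (by decide) h4]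
          simp at h1 h2 h3 h4 n5
          simp [h1, h2, h3, h4, n5, PySem.Dict.insert]
        · by_cases h5 : PySem.Str.startswith l "date      : " = true
          · simp only [pvStepA, pvLVD, split1_startswith l "date      : " (by decide) h5]
            simp at h1 h2 h3 h4 h5
            simp [h1, h2, h3, h4, h5, PySem.Dict.insert]
          · simp only [pvStepA, pvLVD]
            simp at h1 h2 h3 h4 h5
            simp [h1, h2, h3, h4, h5]

-- loop invariant: running A's loop from any five field values equals B's
-- per-field reverse scan over the truncated head, with those values as defaults
theorem loop_inv (ls : List String) : ∀ v1 v2 v3 v4 v5 : String,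
    (pvLoopA ls (PySem.Dict.mk [("message_id", v1), ("subject", v2), ("from", v3), ("to", v4), ("date", v5)])).items =
    [("message_id", pvLVD "message_id: " v1 ((pvHead ls).reverse)),
     ("subject", pvLVD "subject   : " v2 ((pvHead ls).reverse)),
     ("from", pvLVD "from      : " v3 ((pvHead ls).reverse)),
     ("to", pvLVD "to        : " v4 ((pvHead ls).reverse)),
     ("date", pvLVD "date      : " v5 ((pvHead ls).reverse))] := by
  induction ls with
  | nil => intro v1 v2 v3 v4 v5; simp [pvLoopA, pvHead, pvLVD]
  | cons l rest ih =>
    intro v1 v2 v3 v4 v5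
    by_cases hs : PySem.Str.strip l = pvSep
    · simp only [pvLoopA, pvHead, if_pos hs]
      rw [stepA_eq]
      rfl
    · simp only [pvLoopA, pvHead, if_neg hs]
      rw [stepA_eq, ih]
      simp [pvLVD_append]

theorem extract_header_fields_spec : Claim_equal_extract_header_fields := by
  intro t _
  unfold Spec_extract_header_fields extract_header_fields extract_header_fields_alt
  have hof : PySem.Dict.ofList [("message_id", ""), ("subject", ""), ("from", ""), ("to", ""), ("date", "")] =
      PySem.Dict.mk [("message_id", ""), ("subject", ""), ("from", ""), ("to", ""), ("date", "")] := by decide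
  rw [hof, loop_inv]
  simp [pvPrefixes, pvLastValue_eq_LVD]
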